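-- pv_equiv track=rewrite | github.com/ankushtanwar-amroar/Amroar_CRM_replace | backend/modules/flow_builder/screen_flow_utils.py | is_first_screen
-- ===== SOURCE A (Python) =====
-- from typing import Dict, Any, List, Set, Optional
--
-- def is_first_screen(
--     screen_node_id: str,
--     nodes: List[Dict[str, Any]],
--     edges: List[Dict[str, Any]],
--     triggers: List[Dict[str, Any]]
-- ) -> bool:
--     """
--     Determine if a screen is the first screen in the flow
--
--     Salesforce Rule:
--         - The first screen is the first screen element reachable from the start node
--         - Determined by flow graph topology, NOT creation order
--         - Only the first screen can define the associated object
--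
--     Args:
--         screen_node_id: ID of the screen node to check
--         nodes: List of all flow nodes
--         edges: List of all flow edges
--         triggers: List of flow triggers
--
--     Returns:
--         True if this is the first screen, False otherwise
--     """
--     if not nodes or not edges:
--         return True  # If no graph structure, assume first
--
--     # Get all screen nodes
--     screen_nodes = [n for n in nodes if n.get('type') == 'screen']
--
--     if not screen_nodes:
--         return True
--
--     # Find the first screen reachable from start/trigger
--     first_screen = find_first_screen_in_flow(nodes, edges, triggers)
--
--     if not first_screen:
--         # No reachable screen found, check if this is the only screen
--         return screen_node_id == screen_nodes[0].get('id')
--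
--     return screen_node_id == first_screen
--
-- def find_first_screen_in_flow(
--     nodes: List[Dict[str, Any]],
--     edges: List[Dict[str, Any]],
--     triggers: List[Dict[str, Any]]
-- ) -> Optional[str]:
--     """
--     Find the first screen node reachable from the start of the flow
--
--     Uses breadth-first search from trigger/start node
--
--     Args:
--         nodes: List of all flow nodes
--         edges: List of all flow edges
--         triggers: List of flow triggers
--
--     Returns:
--         Node ID of first screen, or None if no screen reachable
--     """
--     # Determine start node
--     start_node_id = None
--     if triggers and len(triggers) > 0:
--         start_node_id = triggers[0].get('id', 'trigger_start')
--     else: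
--         # Look for start/trigger node
--         for node in nodes:
--             if node.get('type') in ['trigger', 'start']:
--                 start_node_id = node.get('id')
--                 break
--
--     if not start_node_id:
--         # No clear start, return first screen by order
--         screen_nodes = [n for n in nodes if n.get('type') == 'screen']
--         return screen_nodes[0].get('id') if screen_nodes else None
--
--     # BFS from start node to find first screen
--     visited = set()
--     queue = [start_node_id]
--     visited.add(start_node_id)
--
--     while queue:
--         current_id = queue.pop(0)
--
--         # Check if current node is a screen
--         current_node = next((n for n in nodes if n.get('id') == current_id), None)
--         if current_node and current_node.get('type') == 'screen':
--             return current_id  # Found first screen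
--
--         # Add connected nodes to queue
--         for edge in edges:
--             if edge.get('source') == current_id:
--                 target_id = edge.get('target')
--                 if target_id and target_id not in visited:
--                     visited.add(target_id)
--                     queue.append(target_id)
--
--     return None  # No screen reachable from start
-- ===== SOURCE B (Python) =====
-- from collections import deque
--
--
-- def is_first_screen(screen_node_id, nodes, edges, triggers):
--     if not nodes or not edges:
--         return True
--     screen_ids = [n.get('id') for n in nodes if n.get('type') == 'screen']
--     if not screen_ids:
--         return True
--     first = _first_reachable_screen(nodes, edges, triggers)
--     if not first:
--         first = screen_ids[0]
--     return screen_node_id == first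
--
--
-- def _first_reachable_screen(nodes, edges, triggers):
--     # id -> type index, first occurrence wins (as a linear scan would)
--     ntype = {}
--     for n in nodes:
--         nid = n.get('id')
--         if nid is not None and nid not in ntype:
--             ntype[nid] = n.get('type')
--     # start node
--     if triggers:
--         start = triggers[0].get('id', 'trigger_start')
--     else:
--         start = next((n.get('id') for n in nodes
--                       if n.get('type') in ('trigger', 'start')), None)
--     if not start:
--         return next((n.get('id') for n in nodes
--                      if n.get('type') == 'screen'), None)
--     # adjacency dict: truthy targets grouped by source, in edge order
--     adj = {}
--     for e in edges:
--         s, t = e.get('source'), e.get('target')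
--         if s is not None and t:
--             adj.setdefault(s, []).append(t)
--     # full BFS visitation order, then pick the first screen from it:
--     # the prefix of the pop order up to the first screen coincides with an
--     # early-stopping BFS, so this returns the same node.
--     order = _bfs_order(start, adj)
--     return next((nid for nid in order if ntype.get(nid) == 'screen'), None)
--
--
-- def _bfs_order(start, adj):
--     visited = {start}
--     queue = deque([start])
--     order = []
--     while queue:
--         cur = queue.popleft()
--         order.append(cur)
--         for t in adj.get(cur, ()):
--             if t not in visited:
--                 visited.add(t)
--                 queue.append(t)
--     return order
-- ===== Notes on version B (the rewrite author's own statement) =====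
-- stated objective: alternative
-- what changed: B indexes node types by id and groups edge targets into an adjacency dict once, computes the complete BFS visitation order of the flow graph as a list, and then selects the first screen from that order in a separate pass, replacing A's early-stopping BFS whose every step rescans the whole node and edge lists.
import Mathlib
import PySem

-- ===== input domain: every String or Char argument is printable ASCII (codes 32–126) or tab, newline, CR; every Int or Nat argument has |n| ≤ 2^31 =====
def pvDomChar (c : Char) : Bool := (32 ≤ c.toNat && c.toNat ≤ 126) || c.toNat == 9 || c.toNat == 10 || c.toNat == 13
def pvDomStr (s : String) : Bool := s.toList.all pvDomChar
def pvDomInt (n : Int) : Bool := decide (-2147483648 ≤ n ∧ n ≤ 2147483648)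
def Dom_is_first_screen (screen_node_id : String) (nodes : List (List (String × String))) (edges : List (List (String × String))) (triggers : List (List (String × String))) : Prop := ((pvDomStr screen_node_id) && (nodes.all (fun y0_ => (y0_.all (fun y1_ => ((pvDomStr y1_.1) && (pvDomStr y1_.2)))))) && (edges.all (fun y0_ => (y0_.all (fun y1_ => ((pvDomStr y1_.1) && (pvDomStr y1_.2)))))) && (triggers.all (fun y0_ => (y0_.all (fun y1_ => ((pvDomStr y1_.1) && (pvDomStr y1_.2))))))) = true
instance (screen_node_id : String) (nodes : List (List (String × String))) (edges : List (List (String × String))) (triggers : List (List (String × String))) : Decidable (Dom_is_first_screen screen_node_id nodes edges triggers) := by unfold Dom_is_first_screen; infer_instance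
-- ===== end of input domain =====

-- B builds id→type and adjacency dicts once, computes the full BFS visitation order as a list, and picks the first screen from that order in a separate pass; the return value is proved equal to A's on all inputs.


-- dict.get(k) on an input dict (association list, first match) — used by both ports
def dget (d : List (String × String)) (k : String) : Option String :=
  (d.find? (fun p => p.1 == k)).map (fun p => p.2)

-- ===== PORT A =====
-- 'if current_node and current_node.get('type') == 'screen''
def aScreenTest (nodes : List (List (String × String))) (current : String) : Bool :=
  match nodes.find? (fun n => dget n "id" == some current) with
  | some n => !n.isEmpty && (dget n "type" == some "screen")
  | none => false

-- the inner 'for edge in edges' loop of one BFS iteration (state = (visited, queue))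
def aStep (edges : List (List (String × String))) (current : String)
    (vq : PySem.Set String × List String) : PySem.Set String × List String :=
  edges.foldl (fun vq edge =>
    if dget edge "source" == some current then
      match dget edge "target" with
      | some t =>
        if t != "" && !(PySem.Set.contains vq.1 t) then (PySem.Set.add vq.1 t, vq.2 ++ [t]) else vq
      | none => vq
    else vq) vq

-- 'while queue' BFS; fuel = edges.length + 1 bounds the number of pops (each append marks a
-- fresh target visited, so pops ≤ 1 + edges.length), so the fuel-0 case is unreachable with a
-- nonempty queue and the port computes exactly what the Python loop computes.
def aBFS (nodes edges : List (List (String × String))) :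
    Nat → List String → PySem.Set String → Option String
  | 0, _, _ => none
  | _ + 1, [], _ => none
  | fuel + 1, current :: rest, visited =>
    if aScreenTest nodes current then some current
    else
      let vq := aStep edges current (visited, rest)
      aBFS nodes edges fuel vq.2 vq.1

def aFindFirst (nodes edges triggers : List (List (String × String))) : Option String :=
  let startId : Option String :=
    match triggers with
    | t :: _ => some ((dget t "id").getD "trigger_start")
    | [] =>
      match nodes.find? (fun n => dget n "type" == some "trigger" || dget n "type" == some "start") with
      | some n => dget n "id"
      | none => none
  let noStart : Option String :=
    match nodes.filter (fun n => dget n "type" == some "screen") with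
    | [] => none
    | s0 :: _ => dget s0 "id"
  match startId with
  | none => noStart
  | some s =>
    if s = "" then noStart
    else aBFS nodes edges (edges.length + 1) [s] (PySem.Set.add PySem.Set.empty s)

def is_first_screen (screen_node_id : String) (nodes : List (List (String × String))) (edges : List (List (String × String))) (triggers : List (List (String × String))) : Bool :=
  if nodes.isEmpty || edges.isEmpty then true
  else
    match nodes.filter (fun n => dget n "type" == some "screen") with
    | [] => true
    | s0 :: _ =>
      match aFindFirst nodes edges triggers with
      | none => some screen_node_id == dget s0 "id"
      | some f =>
        if f = "" then some screen_node_id == dget s0 "id"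
        else screen_node_id == f

-- ===== PORT B =====
-- id → type dict, first occurrence wins
def bNType (nodes : List (List (String × String))) : PySem.Dict String (Option String) :=
  nodes.foldl (fun d n =>
    match dget n "id" with
    | some nid => if d.contains nid then d else d.insert nid (dget n "type")
    | none => d) PySem.Dict.empty

-- adjacency dict built in one pass: adj.setdefault(s, []).append(t) for truthy targets
def bAdjacency (edges : List (List (String × String))) : PySem.Dict String (List String) :=
  edges.foldl (fun d e =>
    match dget e "source", dget e "target" with
    | some s, some t => if t != "" then d.modify s [] (fun l => l ++ [t]) else d
    | _, _ => d) PySem.Dict.empty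

-- the body of 'for t in adj.get(cur, ()): if t not in visited: …'
def bVisit (vq : PySem.Set String × List String) (t : String) : PySem.Set String × List String :=
  if !(PySem.Set.contains vq.1 t) then (PySem.Set.add vq.1 t, vq.2 ++ [t]) else vq

-- _bfs_order: the complete FIFO pop order of the traversal (no screen test inside);
-- the same fuel bound as A's port: pops ≤ 1 + appends ≤ 1 + edges.length.
def bOrder (adj : PySem.Dict String (List String)) :
    Nat → List String → PySem.Set String → List String
  | 0, _, _ => []
  | _ + 1, [], _ => []
  | fuel + 1, cur :: rest, visited =>
    let vq := (adj.getD cur []).foldl bVisit (visited, rest)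
    cur :: bOrder adj fuel vq.2 vq.1

-- _first_reachable_screen
def bFindFirst (nodes edges triggers : List (List (String × String))) : Option String :=
  let ntype := bNType nodes
  let startId : Option String :=
    match triggers with
    | t :: _ => some ((dget t "id").getD "trigger_start")
    | [] =>
      (nodes.find? (fun n => dget n "type" == some "trigger" || dget n "type" == some "start")).bind
        (fun n => dget n "id")
  match startId with
  | some s =>
    if s = "" then
      (nodes.find? (fun n => dget n "type" == some "screen")).bind (fun n => dget n "id")
    else
      (bOrder (bAdjacency edges) (edges.length + 1) [s]
        (PySem.Set.add PySem.Set.empty s)).find?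
        (fun c => ntype.getD c none == some "screen")
  | none =>
    (nodes.find? (fun n => dget n "type" == some "screen")).bind (fun n => dget n "id")

def is_first_screen_alt (screen_node_id : String) (nodes : List (List (String × String))) (edges : List (List (String × String))) (triggers : List (List (String × String))) : Bool :=
  if nodes.isEmpty || edges.isEmpty then true
  else
    match (nodes.filter (fun n => dget n "type" == some "screen")).map (fun n => dget n "id") with
    | [] => true
    | d0 :: _ =>
      let first : Option String :=
        match bFindFirst nodes edges triggers with
        | some f => if f = "" then d0 else some f
        | none => d0
      some screen_node_id == first

-- ===== PRECONDITION & SPEC =====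
def Spec_is_first_screen (screen_node_id : String) (nodes : List (List (String × String))) (edges : List (List (String × String))) (triggers : List (List (String × String))) (out : Bool) : Prop := out = is_first_screen_alt screen_node_id nodes edges triggers
instance (screen_node_id : String) (nodes : List (List (String × String))) (edges : List (List (String × String))) (triggers : List (List (String × String))) (out : Bool) : Decidable (Spec_is_first_screen screen_node_id nodes edges triggers out) := by unfold Spec_is_first_screen; infer_instance

-- ===== CLAIM (what is proved, stated in full; the proofs are below) =====
def Claim_equal_is_first_screen : Prop := ∀ (screen_node_id : String) (nodes : List (List (String × String))) (edges : List (List (String × String))) (triggers : List (List (String × String))), Dom_is_first_screen screen_node_id nodes edges triggers → Spec_is_first_screen screen_node_id nodes edges triggers (is_first_screen screen_node_id nodes edges triggers)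

-- ===== LEMMAS AND PROOFS =====

-- the (source, target) extraction of one edge, as a filterMap step
def pairOf (e : List (String × String)) : Option (String × String) :=
  match dget e "source", dget e "target" with
  | some s, some t => if t != "" then some (s, t) else none
  | _, _ => none

-- A's inner edge-loop body, named for the proofs
def aStep1 (current : String) (vq : PySem.Set String × List String)
    (edge : List (String × String)) : PySem.Set String × List String :=
  if dget edge "source" == some current then
    match dget edge "target" with
    | some t =>
      if t != "" && !(PySem.Set.contains vq.1 t) then (PySem.Set.add vq.1 t, vq.2 ++ [t]) else vq
    | none => vq
  else vq

theorem aStep_eq_foldl (edges : List (List (String × String))) (current : String)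
    (vq : PySem.Set String × List String) :
    aStep edges current vq = edges.foldl (aStep1 current) vq := rfl

theorem aStep1_eq (current : String) (vq : PySem.Set String × List String)
    (e : List (String × String)) :
    aStep1 current vq e
      = match pairOf e with
        | some (s, t) => if s == current then bVisit vq t else vq
        | none => vq := by
  unfold aStep1 pairOf bVisit
  cases hs : dget e "source" <;> cases ht : dget e "target"
  · simp
  · simp
  · simp
  · rename_i s t
    by_cases htt : t = ""
    · subst htt; simp
    · have h1 : (t != "") = true := by simp [htt]
      simp only [h1, if_true, Bool.true_and]
      by_cases hsc : s = current
      · subst hsc; simp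
      · have h2 : (some s == some current) = false := by simp [hsc]
        have h3 : (s == current) = false := by simp [hsc]
        simp [h2, h3]

theorem bAdjacency_eq (edges : List (List (String × String))) :
    bAdjacency edges
      = (edges.filterMap pairOf).foldl
          (fun d p => d.modify p.1 [] (fun l => l ++ [p.2])) PySem.Dict.empty := by
  suffices h : ∀ d : PySem.Dict String (List String),
      edges.foldl (fun d e =>
        match dget e "source", dget e "target" with
        | some s, some t => if t != "" then d.modify s [] (fun l => l ++ [t]) else d
        | _, _ => d) d
        = (edges.filterMap pairOf).foldl
            (fun d p => d.modify p.1 [] (fun l => l ++ [p.2])) d by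
    exact h _
  induction edges with
  | nil => intro d; rfl
  | cons e tl ih =>
    intro d
    rw [List.foldl_cons, List.filterMap_cons]
    cases hp : pairOf e with
    | none =>
      have hb : (match dget e "source", dget e "target" with
          | some s, some t => if t != "" then d.modify s [] (fun l => l ++ [t]) else d
          | _, _ => d) = d := by
        unfold pairOf at hp
        cases hs : dget e "source" with
        | none => simp
        | some s' =>
          cases ht : dget e "target" with
          | none => simp
          | some t' =>
            rw [hs, ht] at hp
            by_cases htt : t' = ""
            · subst htt; simp
            · have h1 : (t' != "") = true := by simp [htt]
              simp only [h1] at hp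
              simp at hp
      rw [hb]; exact ih d
    | some p =>
      obtain ⟨s, t⟩ := p
      have hb : (match dget e "source", dget e "target" with
          | some s', some t' => if t' != "" then d.modify s' [] (fun l => l ++ [t']) else d
          | _, _ => d) = d.modify s [] (fun l => l ++ [t]) := by
        unfold pairOf at hp
        cases hs : dget e "source" with
        | none => rw [hs] at hp; simp at hp
        | some s' =>
          cases ht : dget e "target" with
          | none => rw [hs, ht] at hp; simp at hp
          | some t' =>
            rw [hs, ht] at hp
            by_cases htt : t' = ""
            · subst htt; simp at hp
            · have h1 : (t' != "") = true := by simp [htt]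
              simp only [h1, if_true] at hp
              simp only [Option.some.injEq, Prod.mk.injEq] at hp
              obtain ⟨rfl, rfl⟩ := hp
              simp [h1]
      rw [hb, List.foldl_cons]
      exact ih _

theorem adj_getD (edges : List (List (String × String))) (c : String) :
    (bAdjacency edges).getD c []
      = ((edges.filterMap pairOf).filter (fun p => p.1 == c)).map (fun p => p.2) := by
  rw [bAdjacency_eq]
  simp [PySem.Dict.getD_foldl_modify_append, PySem.Dict.getD_empty]

theorem step_eq (edges : List (List (String × String))) (current : String)
    (vq : PySem.Set String × List String) :
    aStep edges current vq = ((bAdjacency edges).getD current []).foldl bVisit vq := by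
  rw [adj_getD, aStep_eq_foldl]
  induction edges generalizing vq with
  | nil => rfl
  | cons e tl ih =>
    rw [List.foldl_cons, aStep1_eq, List.filterMap_cons]
    cases hp : pairOf e with
    | none => exact ih _
    | some p =>
      obtain ⟨s, t⟩ := p
      simp only [List.filter_cons]
      by_cases hsc : (s == current) = true
      · simp only [hsc, if_true, List.map_cons, List.foldl_cons]
        exact ih _
      · simp only [Bool.not_eq_true] at hsc
        simp only [hsc, Bool.false_eq_true, if_false]
        exact ih _

theorem ntype_aux (nodes : List (List (String × String))) (c : String)
    (d : PySem.Dict String (Option String)) :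
    (nodes.foldl (fun d n =>
        match dget n "id" with
        | some nid => if d.contains nid then d else d.insert nid (dget n "type")
        | none => d) d).getD c none
      = if d.contains c then d.getD c none
        else (nodes.find? (fun n => dget n "id" == some c)).bind (fun n => dget n "type") := by
  induction nodes generalizing d with
  | nil =>
    simp only [List.foldl_nil, List.find?_nil]
    split
    · rfl
    · rename_i h
      exact PySem.Dict.getD_of_not_contains _ _ (by simpa using h)
  | cons n tl ih =>
    simp only [List.foldl_cons, List.find?_cons]
    cases hid : dget n "id" with
    | none => simp [ih]
    | some nid =>
      by_cases hc : nid = c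
      · subst hc
        by_cases hcon : d.contains nid
        · simp [hcon, ih]
        · simp only [Bool.not_eq_true] at hcon
          simp only [ih]
          simp [hcon]
      · have hne : (some nid == some c) = false := by simp [hc]
        simp only [hne]
        by_cases hcon : (d.contains nid) = true
        · simp [hcon, ih]
        · simp only [Bool.not_eq_true] at hcon
          simp only [hcon, Bool.false_eq_true, if_false, ih]
          rw [PySem.Dict.contains_insert,
            PySem.Dict.getD_insert_of_ne _ _ _ (Ne.symm hc)]
          have hcb : (c == nid) = false := beq_eq_false_iff_ne.mpr (Ne.symm hc)
          simp [hcb]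

theorem ntype_getD (nodes : List (List (String × String))) (c : String) :
    (bNType nodes).getD c none
      = (nodes.find? (fun n => dget n "id" == some c)).bind (fun n => dget n "type") := by
  rw [bNType, ntype_aux]
  simp [PySem.Dict.contains_empty]

theorem screenTest_eq (nodes : List (List (String × String))) (c : String) :
    aScreenTest nodes c = ((bNType nodes).getD c none == some "screen") := by
  rw [ntype_getD, aScreenTest]
  cases h : nodes.find? (fun n => dget n "id" == some c) with
  | none => simp
  | some n =>
    cases n with
    | nil => simp [dget]
    | cons p tl => simp

-- the key correspondence: A's early-stopping BFS = first screen of B's full pop order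
theorem bfs_find (nodes edges : List (List (String × String))) (fuel : Nat)
    (queue : List String) (visited : PySem.Set String) :
    aBFS nodes edges fuel queue visited
      = (bOrder (bAdjacency edges) fuel queue visited).find?
          (fun c => (bNType nodes).getD c none == some "screen") := by
  induction fuel generalizing queue visited with
  | zero => rfl
  | succ fuel ih =>
    cases queue with
    | nil => rfl
    | cons cur rest =>
      simp only [aBFS, bOrder, List.find?_cons, screenTest_eq, step_eq]
      split
      · rename_i h
        rw [h]
      · rename_i h
        rw [Bool.not_eq_true] at h
        rw [h]
        exact ih _ _

theorem filter_screen_find (nodes : List (List (String × String))) :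
    (nodes.filter (fun n => dget n "type" == some "screen")).head?
      = nodes.find? (fun n => dget n "type" == some "screen") :=
  List.head?_filter

theorem findFirst_eq (nodes edges triggers : List (List (String × String))) :
    aFindFirst nodes edges triggers = bFindFirst nodes edges triggers := by
  have hns : (match nodes.filter (fun n => dget n "type" == some "screen") with
      | [] => (none : Option String)
      | s0 :: _ => dget s0 "id")
      = (nodes.find? (fun n => dget n "type" == some "screen")).bind (fun n => dget n "id") := by
    rw [← filter_screen_find]
    cases nodes.filter (fun n => dget n "type" == some "screen") <;> simp
  simp only [aFindFirst, bFindFirst, hns, bfs_find]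
  cases triggers with
  | cons t tl => simp
  | nil =>
    cases nodes.find? (fun n => dget n "type" == some "trigger" || dget n "type" == some "start") with
    | none => simp
    | some n =>
      cases h : dget n "id" with
      | none => simp [h]
      | some s => simp [h]

-- ===== VERDICT (by name: the statement is the Claim_ definition above) =====
theorem is_first_screen_spec : Claim_equal_is_first_screen := by
  unfold Claim_equal_is_first_screen
  intro sid nodes edges triggers _
  unfold Spec_is_first_screen is_first_screen is_first_screen_alt
  split
  · rfl
  · cases hf : nodes.filter (fun n => dget n "type" == some "screen") with
    | nil => simp
    | cons s0 tl =>
      simp only [List.map_cons, findFirst_eq]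
      cases bFindFirst nodes edges triggers with
      | none => simp
      | some f =>
        by_cases hfe : f = ""
        · simp [hfe]
        · simp [hfe]
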